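-- pv_equiv track=rewrite | github.com/SashaFedosov/Fedosov_et_al_MOLD_codes_and_data | SData5_rDNC_h-sampling/MolD_h-sampling_rDNC.py | DefineVarPos
-- ===== SOURCE A (Python) =====
-- def DefineVarPos(seqs):
--     VarPos = []
--     for i in range(len(seqs[0])):
--         nlist = [seq[i] for seq in seqs if seq[i] != 'N']
--         if len(nlist) != 0:
--             if len(nlist) == nlist.count(nlist[0]):
--                 continue
--             else:
--                 VarPos.append(i)
--     return VarPos
-- ===== SOURCE B (Python) =====
-- def DefineVarPos(seqs):
--     L = len(seqs[0])
--     first = [None] * L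
--     varpos = set()
--     for seq in seqs:
--         for i in range(L):
--             c = seq[i]
--             if c != 'N':
--                 f = first[i]
--                 if f is None:
--                     first[i] = c
--                 elif f != c:
--                     varpos.add(i)
--     return sorted(varpos)
-- ===== Notes on version B (the rewrite author's own statement) =====
-- stated objective: alternative
-- what changed: Replaced the column-major scan that materialises each column as a list and tests it with count() by a single row-major pass keeping a per-position first-seen-character table and a set of variable positions, sorted at the end.
import Mathlib
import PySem

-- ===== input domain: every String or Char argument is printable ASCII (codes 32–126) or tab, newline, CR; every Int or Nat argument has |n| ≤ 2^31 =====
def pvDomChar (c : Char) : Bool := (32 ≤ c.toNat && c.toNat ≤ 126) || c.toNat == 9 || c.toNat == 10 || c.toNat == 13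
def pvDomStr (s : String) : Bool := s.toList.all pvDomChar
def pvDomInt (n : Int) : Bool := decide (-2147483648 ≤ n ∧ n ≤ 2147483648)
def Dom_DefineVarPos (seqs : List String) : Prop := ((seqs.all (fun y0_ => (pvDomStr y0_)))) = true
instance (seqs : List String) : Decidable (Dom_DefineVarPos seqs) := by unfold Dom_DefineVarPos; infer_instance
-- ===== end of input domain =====

-- B replaces A's column-major scan (building each column as a list and testing it with count)
-- by a single row-major pass over the sequences keeping a per-position first-seen-character
-- table and a set of variable positions, sorted at the end (objective: alternative).

-- ===== PORT A =====
def DefineVarPos (seqs : List String) : List Int :=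
  (PySem.List.pyRange 0 (PySem.Str.len (seqs.headD "")) 1).foldl
    (fun VarPos i =>
      let nlist := (seqs.filterMap (fun seq => PySem.Str.pyGet? seq i)).filter
        (fun c => decide (c ≠ 'N'))
      if nlist.length ≠ 0 then
        if nlist.length = nlist.count (nlist.headD 'N') then VarPos
        else VarPos ++ [i]
      else VarPos)
    []

-- ===== PORT B =====
-- the body of B's inner 'for i in range(L)' loop (seq[i] is in range only under Pre_)
def DefineVarPosInner (seq : String) (st : List (Option Char) × PySem.Set Int) (i : Int) :
    List (Option Char) × PySem.Set Int :=
  let c : Char := (PySem.Str.pyGet? seq i).getD 'N'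
  if c ≠ 'N' then
    match PySem.List.pyGetD st.1 i none with
    | none => (PySem.List.pySetD st.1 i (some c), st.2)
    | some f => if f ≠ c then (st.1, PySem.Set.add st.2 i) else st
  else st

def DefineVarPosRow (L : Int) (st : List (Option Char) × PySem.Set Int) (seq : String) :
    List (Option Char) × PySem.Set Int :=
  (PySem.List.pyRange 0 L 1).foldl (DefineVarPosInner seq) st


def DefineVarPos_alt (seqs : List String) : List Int :=
  let L : Int := PySem.Str.len (seqs.headD "")
  let st := seqs.foldl (DefineVarPosRow L) (List.replicate L.toNat none, PySem.Set.empty)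
  PySem.List.sorted st.2 (fun x => x) false

-- ===== PRECONDITION & SPEC =====
-- Pre_ excludes exactly the inputs on which the Python A raises IndexError (and B raises there
-- too): the empty list (seqs[0]) and ragged inputs where some row is shorter than seqs[0].
def Pre_DefineVarPos (seqs : List String) : Prop :=
  seqs ≠ [] ∧ ∀ s ∈ seqs, (seqs.headD "").toList.length ≤ s.toList.length
instance (seqs : List String) : Decidable (Pre_DefineVarPos seqs) := by
  unfold Pre_DefineVarPos; infer_instance
def pvWitness_DefineVarPos : List String := ["ACN", "AGN"]
def Spec_DefineVarPos (seqs : List String) (out : List Int) : Prop := out = DefineVarPos_alt seqs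
instance (seqs : List String) (out : List Int) : Decidable (Spec_DefineVarPos seqs out) := by
  unfold Spec_DefineVarPos; infer_instance

-- ===== CLAIM (what is proved, stated in full; the proofs are below) =====
def Claim_equal_DefineVarPos : Prop := ∀ (seqs : List String), Dom_DefineVarPos seqs → Pre_DefineVarPos seqs → Spec_DefineVarPos seqs (DefineVarPos seqs)

-- ===== LEMMAS AND PROOFS =====

def pvStep (f : Option Char) (c : Char) : Option Char :=
  if c = 'N' then f else match f with | none => some c | some _ => f
def pvAdd (f : Option Char) (c : Char) : Prop :=
  c ≠ 'N' ∧ ∃ x, f = some x ∧ x ≠ c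
def pvCol (p : List String) (k : Nat) : List Char :=
  (p.filterMap (fun s => s.toList[k]?)).filter (fun c => decide (c ≠ 'N'))
abbrev pvVar (p : List String) (k : Nat) : Prop :=
  ∃ c ∈ pvCol p k, some c ≠ (pvCol p k).head?
lemma step_spec (seq : String) (st : List (Option Char) × PySem.Set Int) (m : Nat)
    (hlen : m < st.1.length) :
    (DefineVarPosInner seq st (m : Int)).1.length = st.1.length ∧
    (∀ k : Nat, (DefineVarPosInner seq st (m : Int)).1[k]?.getD none =
      if k = m then pvStep (st.1[m]?.getD none) (seq.toList[m]?.getD 'N')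
      else st.1[k]?.getD none) ∧
    (∀ j : Int, j ∈ (DefineVarPosInner seq st (m : Int)).2 ↔
      j ∈ st.2 ∨ (j = (m : Int) ∧ pvAdd (st.1[m]?.getD none) (seq.toList[m]?.getD 'N'))) ∧
    (st.2.Nodup → (DefineVarPosInner seq st (m : Int)).2.Nodup) := by
  have hc : (PySem.Str.pyGet? seq (m : Int)).getD 'N' = seq.toList[m]?.getD 'N' := by
    simp
  have hget : PySem.List.pyGetD st.1 ((m : Nat) : Int) none = st.1[m]?.getD none := by
    simp
  set c := seq.toList[m]?.getD 'N' with hcdef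
  by_cases hN : c = 'N'
  · have hres : DefineVarPosInner seq st (m : Int) = st := by
      unfold DefineVarPosInner
      rw [hc, if_neg (by simp [hN])]
    rw [hres]
    have hstep : pvStep (st.1[m]?.getD none) c = st.1[m]?.getD none := by
      simp [pvStep, hN]
    refine ⟨rfl, fun k => ?_, fun j => ?_, fun h => h⟩
    · rw [hstep]; split <;> simp_all
    · simp [pvAdd, hN]
  · cases hf : st.1[m]?.getD none with
    | none =>
      have hres : DefineVarPosInner seq st (m : Int) = (st.1.set m (some c), st.2) := by
        unfold DefineVarPosInner
        rw [hc, if_pos (by simp [hN]), hget, hf, PySem.List.pySetD_natCast]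
      rw [hres]
      have hstep : pvStep (none : Option Char) c = some c := by
        simp [pvStep, hN]
      refine ⟨by simp, fun k => ?_, fun j => ?_, fun h => h⟩
      · rw [hstep]
        by_cases hk : k = m
        · subst hk; simp [hlen]
        · simp [Ne.symm hk, hk]
      · simp [pvAdd]
    | some f =>
      by_cases hfc : f = c
      · have hres : DefineVarPosInner seq st (m : Int) = st := by
          unfold DefineVarPosInner
          rw [hc, if_pos (by simp [hN]), hget, hf]
          simp [hfc]
        rw [hres]
        have hstep : pvStep (some f) c = some f := by
          simp [pvStep, hN]
        refine ⟨rfl, fun k => ?_, fun j => ?_, fun h => h⟩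
        · rw [hstep]; split <;> simp_all
        · simp only [pvAdd, Option.some.injEq]
          constructor
          · exact fun h => Or.inl h
          · rintro (h | ⟨rfl, -, x, rfl, hxc⟩)
            · exact h
            · exact absurd hfc hxc
      · have hres : DefineVarPosInner seq st (m : Int) =
            (st.1, PySem.Set.add st.2 (m : Int)) := by
          unfold DefineVarPosInner
          rw [hc, if_pos (by simp [hN]), hget, hf]
          simp [hfc]
        rw [hres]
        have hstep : pvStep (some f) c = some f := by
          simp [pvStep, hN]
        refine ⟨rfl, fun k => ?_, fun j => ?_, fun h => PySem.Set.nodup_add _ _ h⟩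
        · rw [hstep]; split <;> simp_all
        · rw [PySem.Set.mem_add]
          simp only [pvAdd, Option.some.injEq]
          constructor
          · rintro (h | rfl)
            · exact Or.inl h
            · exact Or.inr ⟨rfl, hN, f, rfl, hfc⟩
          · rintro (h | ⟨rfl, -⟩)
            · exact Or.inl h
            · exact Or.inr rfl

lemma inner_spec (seq : String) (n : Nat) (m : Nat) (hm : m ≤ n)
    (first : List (Option Char)) (vs : PySem.Set Int)
    (hlen : first.length = n) (hnd : vs.Nodup) :
    ((PySem.List.pyRange 0 (m : Int) 1).foldl (DefineVarPosInner seq) (first, vs)).1.length = n ∧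
    ((PySem.List.pyRange 0 (m : Int) 1).foldl (DefineVarPosInner seq) (first, vs)).2.Nodup ∧
    (∀ k : Nat,
      ((PySem.List.pyRange 0 (m : Int) 1).foldl (DefineVarPosInner seq) (first, vs)).1[k]?.getD none =
        if k < m then pvStep (first[k]?.getD none) (seq.toList[k]?.getD 'N')
        else first[k]?.getD none) ∧
    (∀ j : Int,
      j ∈ ((PySem.List.pyRange 0 (m : Int) 1).foldl (DefineVarPosInner seq) (first, vs)).2 ↔
        j ∈ vs ∨ ∃ k : Nat, k < m ∧ j = (k : Int) ∧
          pvAdd (first[k]?.getD none) (seq.toList[k]?.getD 'N')) := by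
  induction m with
  | zero =>
    rw [show ((0 : Nat) : Int) = 0 by simp, PySem.List.pyRange_one_eq_nil le_rfl]
    simp [hlen, hnd]
  | succ m ih =>
    obtain ⟨ih1, ih2, ih3, ih4⟩ := ih (Nat.le_of_succ_le hm)
    have hrange : PySem.List.pyRange 0 ((m + 1 : Nat) : Int) 1 =
        PySem.List.pyRange 0 ((m : Nat) : Int) 1 ++ [((m : Nat) : Int)] := by
      push_cast
      exact PySem.List.pyRange_one_succ_right (by positivity)
    rw [hrange, List.foldl_append, List.foldl_cons, List.foldl_nil]
    set st := (PySem.List.pyRange 0 ((m : Nat) : Int) 1).foldl (DefineVarPosInner seq)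
      (first, vs) with hst
    obtain ⟨s1, s2, s3, s4⟩ := step_spec seq st m (by rw [ih1]; omega)
    have hfm : st.1[m]?.getD none = first[m]?.getD none := by
      rw [ih3 m, if_neg (by omega)]
    refine ⟨by rw [s1, ih1], s4 ih2, fun k => ?_, fun j => ?_⟩
    · rw [s2 k]
      by_cases hk : k = m
      · subst hk
        rw [if_pos rfl, if_pos (by omega), hfm]
      · rw [if_neg hk, ih3 k]
        by_cases hk2 : k < m
        · rw [if_pos hk2, if_pos (by omega)]
        · rw [if_neg hk2, if_neg (by omega)]
    · rw [s3 j, ih4 j, hfm]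
      constructor
      · rintro ((h | ⟨k, hk, rfl, hadd⟩) | ⟨rfl, hadd⟩)
        · exact Or.inl h
        · exact Or.inr ⟨k, by omega, rfl, hadd⟩
        · exact Or.inr ⟨m, by omega, rfl, hadd⟩
      · rintro (h | ⟨k, hk, rfl, hadd⟩)
        · exact Or.inl (Or.inl h)
        · by_cases hkm : k = m
          · subst hkm; exact Or.inr ⟨rfl, hadd⟩
          · exact Or.inl (Or.inr ⟨k, by omega, rfl, hadd⟩)

lemma pvCol_append_singleton (p : List String) (s : String) (k : Nat)
    (hk : k < s.toList.length) :
    pvCol (p ++ [s]) k =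
      pvCol p k ++ (if s.toList[k] ≠ 'N' then [s.toList[k]] else []) := by
  simp [pvCol, List.filterMap_append, List.filter_append, List.getElem?_eq_getElem hk,
    List.filter_singleton]

lemma var_aux (l : List Char) (c : Char) :
    (∃ d ∈ l ++ (if c ≠ 'N' then [c] else []),
        some d ≠ (l ++ (if c ≠ 'N' then [c] else [])).head?) ↔
      (∃ d ∈ l, some d ≠ l.head?) ∨ pvAdd l.head? c := by
  by_cases hc : c = 'N'
  · simp [hc, pvAdd]
  · cases l with
    | nil => simp [hc, pvAdd]
    | cons h t =>
      simp only [if_pos hc, pvAdd, List.cons_append, List.head?_cons, ne_eq,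
        Option.some.injEq, List.mem_cons, List.mem_append]
      constructor
      · rintro ⟨d, (rfl | hd | hd), hne⟩
        · exact absurd rfl hne
        · exact Or.inl ⟨d, Or.inr hd, hne⟩
        · rcases hd with rfl | hd
          · exact Or.inr ⟨hc, h, rfl, fun e => hne e.symm⟩
          · simp at hd
      · rintro (⟨d, (rfl | hd), hne⟩ | ⟨-, x, hx, hxc⟩)
        · exact absurd rfl hne
        · exact ⟨d, Or.inr (Or.inl hd), hne⟩
        · exact ⟨c, Or.inr (Or.inr (Or.inl rfl)), fun e => hxc (by simpa using hx ▸ e.symm)⟩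

lemma head_aux (l : List Char) (c : Char) :
    (l ++ (if c ≠ 'N' then [c] else [])).head? = pvStep l.head? c := by
  by_cases hc : c = 'N' <;> cases l <;> simp [hc, pvStep]

lemma pvVar_append_singleton (p : List String) (s : String) (k : Nat)
    (hk : k < s.toList.length) :
    pvVar (p ++ [s]) k ↔ pvVar p k ∨ pvAdd ((pvCol p k).head?) (s.toList[k]) := by
  rw [pvVar, pvCol_append_singleton p s k hk]
  exact var_aux _ _

lemma pvHead_append_singleton (p : List String) (s : String) (k : Nat)
    (hk : k < s.toList.length) :
    (pvCol (p ++ [s]) k).head? = pvStep ((pvCol p k).head?) (s.toList[k]) := by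
  rw [pvCol_append_singleton p s k hk]
  exact head_aux _ _

lemma outer_spec (n : Nat) (rest : List String) (hrest : ∀ s ∈ rest, n ≤ s.toList.length)
    (p : List String) (first : List (Option Char)) (vs : PySem.Set Int)
    (hlen : first.length = n) (hnd : vs.Nodup)
    (hf : ∀ k : Nat, k < n → first[k]?.getD none = (pvCol p k).head?)
    (hv : ∀ j : Int, j ∈ vs ↔ ∃ k : Nat, k < n ∧ j = (k : Int) ∧ pvVar p k) :
    (rest.foldl (DefineVarPosRow (n : Int)) (first, vs)).2.Nodup ∧
    (∀ j : Int, j ∈ (rest.foldl (DefineVarPosRow (n : Int)) (first, vs)).2 ↔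
      ∃ k : Nat, k < n ∧ j = (k : Int) ∧ pvVar (p ++ rest) k) := by
  induction rest generalizing p first vs with
  | nil =>
    refine ⟨hnd, fun j => ?_⟩
    simpa using hv j
  | cons s rest ih =>
    have hs : n ≤ s.toList.length := hrest s (by simp)
    obtain ⟨i1, i2, i3, i4⟩ := inner_spec s n n le_rfl first vs hlen hnd
    rw [List.foldl_cons]
    have heq : p ++ s :: rest = (p ++ [s]) ++ rest := by simp
    rw [heq]
    refine ih (fun t ht => hrest t (by simp [ht])) (p ++ [s])
      (DefineVarPosRow (n : Int) (first, vs) s).1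
      (DefineVarPosRow (n : Int) (first, vs) s).2 i1 i2 ?_ ?_
    · intro k hk
      have hklt : k < s.toList.length := lt_of_lt_of_le hk hs
      have hchar : s.toList[k]?.getD 'N' = s.toList[k] := by
        rw [List.getElem?_eq_getElem hklt, Option.getD_some]
      rw [show (DefineVarPosRow (n : Int) (first, vs) s).1 =
        ((PySem.List.pyRange 0 (n : Int) 1).foldl (DefineVarPosInner s) (first, vs)).1 from rfl]
      rw [i3 k, if_pos hk, hchar, hf k hk, pvHead_append_singleton p s k hklt]
    · intro j
      rw [show (DefineVarPosRow (n : Int) (first, vs) s).2 =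
        ((PySem.List.pyRange 0 (n : Int) 1).foldl (DefineVarPosInner s) (first, vs)).2 from rfl]
      rw [i4 j, hv j]
      constructor
      · rintro (⟨k, hk, rfl, hvar⟩ | ⟨k, hk, rfl, hadd⟩)
        · refine ⟨k, hk, rfl, ?_⟩
          rw [pvVar_append_singleton p s k (lt_of_lt_of_le hk hs)]
          exact Or.inl hvar
        · refine ⟨k, hk, rfl, ?_⟩
          have hklt : k < s.toList.length := lt_of_lt_of_le hk hs
          have hchar : s.toList[k]?.getD 'N' = s.toList[k] := by
            rw [List.getElem?_eq_getElem hklt, Option.getD_some]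
          rw [pvVar_append_singleton p s k hklt]
          rw [hchar, hf k hk] at hadd
          exact Or.inr hadd
      · rintro ⟨k, hk, rfl, hvar⟩
        have hklt : k < s.toList.length := lt_of_lt_of_le hk hs
        rw [pvVar_append_singleton p s k hklt] at hvar
        rcases hvar with hvar | hadd
        · exact Or.inl ⟨k, hk, rfl, hvar⟩
        · refine Or.inr ⟨k, hk, rfl, ?_⟩
          have hchar : s.toList[k]?.getD 'N' = s.toList[k] := by
            rw [List.getElem?_eq_getElem hklt, Option.getD_some]
          rw [hchar, hf k hk]
          exact hadd

lemma cond_iff (l : List Char) (d : Char) :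
    (l.length ≠ 0 ∧ l.length ≠ l.count (l.headD d)) ↔ ∃ c ∈ l, some c ≠ l.head? := by
  cases l with
  | nil => simp
  | cons h t =>
    simp only [List.length_cons, List.headD_cons, List.count_cons_self, List.head?_cons, ne_eq,
      Option.some.injEq, List.mem_cons]
    constructor
    · rintro ⟨-, hne⟩
      have hcount : ¬ (List.count h t = t.length) := fun e => hne (by omega)
      rw [List.count_eq_length] at hcount
      push_neg at hcount
      obtain ⟨b, hb, hbe⟩ := hcount
      exact ⟨b, Or.inr hb, fun e => hbe e.symm⟩
    · rintro ⟨c, (rfl | hc), hne⟩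
      · exact absurd rfl hne
      · refine ⟨by omega, fun e => ?_⟩
        have hcl : List.count h t = t.length := by omega
        rw [List.count_eq_length] at hcl
        exact hne (hcl c hc).symm

theorem DefineVarPos_eq_alt (seqs : List String)
    (_hne : seqs ≠ [])
    (hall : ∀ s ∈ seqs, (seqs.headD "").toList.length ≤ s.toList.length) :
    DefineVarPos seqs = DefineVarPos_alt seqs := by
  set n : Nat := (seqs.headD "").toList.length with hn
  have hL : PySem.Str.len (seqs.headD "") = (n : Int) := by
    simp [PySem.Str.len_eq, hn]
  -- the common description: strictly increasing list of variable positions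
  set ys : List Int := ((List.range n).filter (fun k => decide (pvVar seqs k))).map
    (fun k => ((k : Nat) : Int)) with hys
  -- A = ys
  have hA : DefineVarPos seqs = ys := by
    rw [DefineVarPos, hL]
    have hr : PySem.List.pyRange 0 (n : Int) 1 =
        (List.range n).map (fun k => ((k : Nat) : Int)) := by
      rw [PySem.List.pyRange_one]; simp
    rw [hr, List.foldl_map]
    have hcongr : ∀ (acc : List Int), ∀ k ∈ List.range n,
        (fun (VarPos : List Int) (i : Int) =>
          let nlist := (seqs.filterMap (fun seq => PySem.Str.pyGet? seq i)).filter
            (fun c => decide (c ≠ 'N'))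
          if nlist.length ≠ 0 then
            if nlist.length = nlist.count (nlist.headD 'N') then VarPos
            else VarPos ++ [i]
          else VarPos) acc ((k : Nat) : Int) =
        if pvVar seqs k then acc ++ [((k : Nat) : Int)] else acc := by
      intro acc k hk
      simp only
      have hnl : (seqs.filterMap (fun seq => PySem.Str.pyGet? seq ((k : Nat) : Int))).filter
          (fun c => decide (c ≠ 'N')) = pvCol seqs k := by
        simp [pvCol]
      rw [hnl]
      by_cases hvar : pvVar seqs k
      · rw [if_pos hvar]
        obtain ⟨h1, h2⟩ := (cond_iff (pvCol seqs k) 'N').mpr hvar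
        rw [if_pos h1, if_neg h2]
      · rw [if_neg hvar]
        by_cases h1 : (pvCol seqs k).length ≠ 0
        · rw [if_pos h1]
          have h2 : (pvCol seqs k).length = (pvCol seqs k).count ((pvCol seqs k).headD 'N') := by
            by_contra h2
            exact hvar ((cond_iff (pvCol seqs k) 'N').mp ⟨h1, h2⟩)
          rw [if_pos h2]
        · rw [if_neg h1]
    rw [PySem.List.foldl_congr_mem (h := fun acc k hk => hcongr acc k hk)]
    exact (PySem.List.foldl_append_ite (fun k => pvVar seqs k)
      (fun k => ((k : Nat) : Int)) (List.range n) []).trans (by simp [hys])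
  -- B = ys
  have hB : DefineVarPos_alt seqs = ys := by
    rw [DefineVarPos_alt]
    simp only [hL, Int.toNat_natCast]
    obtain ⟨o1, o2⟩ := outer_spec n seqs hall [] (List.replicate n (none : Option Char))
      PySem.Set.empty (by simp) (by simp [PySem.Set.empty])
      (fun k hk => by simp [pvCol]) (fun j => by simp [PySem.Set.empty, pvVar, pvCol])
    have hpw : ys.Pairwise (fun a b => (fun (x : Int) => x) a < (fun (x : Int) => x) b) := by
      rw [hys]
      refine List.Pairwise.map _ (fun {a b} h => ?_) (List.Pairwise.sublist
        List.filter_sublist (List.pairwise_lt_range))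
      simpa using (Int.ofNat_lt.mpr h)
    have hndy : ys.Nodup := hpw.imp (fun h => ne_of_lt h)
    have hmem : ∀ j : Int, j ∈ ys ↔
        j ∈ (seqs.foldl (DefineVarPosRow (n : Int))
          (List.replicate n (none : Option Char), PySem.Set.empty)).2 := by
      intro j
      rw [o2 j, hys]
      simp only [List.mem_map, List.mem_filter, List.mem_range, decide_eq_true_eq,
        List.nil_append]
      constructor
      · rintro ⟨k, ⟨hk, hvar⟩, rfl⟩
        exact ⟨k, hk, rfl, hvar⟩
      · rintro ⟨k, hk, rfl, hvar⟩
        exact ⟨k, ⟨hk, hvar⟩, rfl⟩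
    have hperm : ys.Perm (seqs.foldl (DefineVarPosRow (n : Int))
        (List.replicate n (none : Option Char), PySem.Set.empty)).2 :=
      (List.perm_ext_iff_of_nodup hndy o1).mpr hmem
    exact PySem.List.sorted_eq_of_perm_of_pairwise_lt (hp := hperm) (hs := hpw)
  rw [hA, hB]

-- ===== VERDICT (by name: the statement is the Claim_ definition above) =====
theorem DefineVarPos_spec : Claim_equal_DefineVarPos := by
  intro seqs _ hpre
  unfold Spec_DefineVarPos
  exact DefineVarPos_eq_alt seqs hpre.1 hpre.2
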